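/- GENERATED by farm/mkstatement.py from design/units.split.tsv — do not edit.
   THE SPLIT of the proof unit `start_decoder.R10` into `start_decoder.R10a`, `start_decoder.R10b`, `start_decoder.R10c`, `start_decoder.R10d`, `start_decoder.R10e`: the children's statements give the parent's
   UNCHANGED statement (so nothing above the parent — callers, compositions — is touched by the split). -/
import Vorbis.Spec.StartDecoderR10
import Vorbis.Spec.Units.start_decoder_R10
import Vorbis.Spec.Units.start_decoder_R10a
import Vorbis.Spec.Units.start_decoder_R10b
import Vorbis.Spec.Units.start_decoder_R10c
import Vorbis.Spec.Units.start_decoder_R10d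
import Vorbis.Spec.Units.start_decoder_R10e
namespace Vorbis.Spec.Splits
open X86 X86.User Asan

/-- The children of the split unit `start_decoder.R10` prove it, by `Vorbis.Spec.StartDecoder.SegR10.of_parts`. -/
theorem start_decoder_R10
    (h_start_decoder_R10a : Vorbis.Spec.start_decoder_R10a.Statement)
    (h_start_decoder_R10b : Vorbis.Spec.start_decoder_R10b.Statement)
    (h_start_decoder_R10c : Vorbis.Spec.start_decoder_R10c.Statement)
    (h_start_decoder_R10d : Vorbis.Spec.start_decoder_R10d.Statement)
    (h_start_decoder_R10e : Vorbis.Spec.start_decoder_R10e.Statement) :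
    Vorbis.Spec.start_decoder_R10.Statement := by
  intro Lay _hLay μ _hμ u₀ _hcode _h_ilog _h_get_bits _h_asan_load8_noabort _h_asan_store1_noabort _h_asan_load4_noabort _h_asan_load1_noabort _h_error
  apply Vorbis.Spec.StartDecoder.SegR10.of_parts
  · exact h_start_decoder_R10a Lay _hLay μ _hμ u₀ _hcode
  · exact h_start_decoder_R10b Lay _hLay μ _hμ u₀ _hcode _h_ilog _h_get_bits
  · exact h_start_decoder_R10c Lay _hLay μ _hμ u₀ _hcode _h_ilog _h_get_bits _h_asan_load8_noabort _h_asan_store1_noabort _h_asan_load4_noabort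
  · exact h_start_decoder_R10d Lay _hLay μ _hμ u₀ _hcode _h_asan_load8_noabort _h_asan_store1_noabort _h_asan_load4_noabort _h_asan_load1_noabort
  · exact h_start_decoder_R10e Lay _hLay μ _hμ u₀ _hcode _h_error

end Vorbis.Spec.Splits
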